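-- pv_equiv track=rewrite | github.com/lltcggie/meet-bot-system | meet-webhook/main.py | get_conference_record_from_child
-- ===== SOURCE A (Python) =====
-- def get_conference_record_from_child(resource_name: str) -> str | None:
--     if not resource_name:
--         return None
--     parts = resource_name.split("/")
--     for index, part in enumerate(parts):
--         if part == "conferenceRecords" and index + 1 < len(parts):
--             return f"conferenceRecords/{parts[index + 1]}"
--     return None
-- ===== SOURCE B (Python) =====
-- def get_conference_record_from_child(resource_name: str) -> str | None:
--     # Scan the string segment-by-segment; no list of parts is built.
--     if not resource_name:
--         return None
--     s = resource_name
--     while True: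
--         if s.startswith("conferenceRecords/"):
--             tail = s[len("conferenceRecords/"):]
--             end = tail.find("/")
--             seg = tail if end < 0 else tail[:end]
--             return "conferenceRecords/" + seg
--         cut = s.find("/")
--         if cut < 0:
--             return None
--         s = s[cut + 1:]
-- ===== Notes on version B (the rewrite author's own statement) =====
-- stated objective: alternative
-- what changed: B scans the string in place with startswith, find and slicing, consuming one slash-delimited segment per step, instead of materialising the full list of split parts and scanning it with enumerate.
import Mathlib
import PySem

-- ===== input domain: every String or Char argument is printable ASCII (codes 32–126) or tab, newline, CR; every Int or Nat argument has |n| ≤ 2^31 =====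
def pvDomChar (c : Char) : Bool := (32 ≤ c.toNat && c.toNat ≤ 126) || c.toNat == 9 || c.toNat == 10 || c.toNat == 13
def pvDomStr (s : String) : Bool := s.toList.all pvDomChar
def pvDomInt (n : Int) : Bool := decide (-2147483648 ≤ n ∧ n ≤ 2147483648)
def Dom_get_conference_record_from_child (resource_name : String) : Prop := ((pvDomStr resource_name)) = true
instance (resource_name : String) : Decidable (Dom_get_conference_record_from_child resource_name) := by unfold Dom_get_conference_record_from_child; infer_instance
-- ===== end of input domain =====

-- B replaces A's split-then-enumerate scan by an in-place startswith/find/slice scan over the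
-- string, one slash-delimited segment per step (objective: alternative; same asymptotic cost).

-- "conferenceRecords" / "conferenceRecords/" as character lists
def pvCR : List Char := "conferenceRecords".toList
def pvCRS : List Char := "conferenceRecords/".toList

-- ===== PORT A =====
-- the 'for index, part in enumerate(parts)' loop with its early return
def pvAGo (parts : List (List Char)) : List (Int × List Char) → Option (List Char)
  | [] => none
  | (index, part) :: rest =>
    if part = pvCR ∧ index + 1 < (parts.length : Int) then
      some (pvCRS ++ PySem.List.pyGetD parts (index + 1) [])
    else pvAGo parts rest

def get_conference_record_from_child (resource_name : String) : Option String :=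
  if resource_name.toList = [] then none          -- `if not resource_name`
  else
    let parts := PySem.Chars.splitOn resource_name.toList "/".toList
    (pvAGo parts (PySem.List.enumerate parts 0)).map String.ofList

-- ===== PORT B =====
-- the `while True` scan of Source B; 18 = len("conferenceRecords/")
def pvBScan (s : List Char) : Option (List Char) :=
  if PySem.Chars.startswith s pvCRS then
    some (pvCRS ++
      (if PySem.Chars.find (PySem.List.slice s (some 18) none) ['/'] < 0 then
        PySem.List.slice s (some 18) none
      else
        PySem.List.slice (PySem.List.slice s (some 18) none) none
          (some (PySem.Chars.find (PySem.List.slice s (some 18) none) ['/']))))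
  else if h : PySem.Chars.find s ['/'] < 0 then none
  else pvBScan (PySem.List.slice s (some (PySem.Chars.find s ['/'] + 1)) none)
termination_by s.length
decreasing_by
  have h0 : (0:Int) ≤ PySem.Chars.find s ['/'] := by omega
  have hinf : ['/'] <:+: s := (PySem.Chars.find_nonneg_iff s ['/']).mp h0
  have hs : s ≠ [] := by
    intro he; subst he
    rcases hinf with ⟨a, b, hab⟩
    simpa using congrArg List.length hab.symm
  rw [PySem.List.slice_from s (by omega)]
  have : 0 < s.length := List.length_pos_iff.mpr hs
  simp only [List.length_drop]
  omega

def get_conference_record_from_child_alt (resource_name : String) : Option String :=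
  if resource_name.toList = [] then none
  else (pvBScan resource_name.toList).map String.ofList

-- ===== PRECONDITION & SPEC =====
def Spec_get_conference_record_from_child (resource_name : String) (out : Option String) : Prop := out = get_conference_record_from_child_alt resource_name
instance (resource_name : String) (out : Option String) : Decidable (Spec_get_conference_record_from_child resource_name out) := by unfold Spec_get_conference_record_from_child; infer_instance

-- ===== CLAIM (what is proved, stated in full; the proofs are below) =====
def Claim_equal_get_conference_record_from_child : Prop := ∀ (resource_name : String), Dom_get_conference_record_from_child resource_name → Spec_get_conference_record_from_child resource_name (get_conference_record_from_child resource_name)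

-- ===== LEMMAS AND PROOFS =====

-- proof-side model of s.split('/')
def pvSplitAux : List Char → List (List Char)
  | [] => [[]]
  | c :: rest => if c = '/' then [] :: pvSplitAux rest else (pvSplitAux rest).modifyHead (c :: ·)

-- proof-side join with '/'
def pvJoin : List (List Char) → List Char
  | [] => []
  | [p] => p
  | p :: q :: rest => p ++ '/' :: pvJoin (q :: rest)

-- common functional spec: first "conferenceRecords" segment with a successor
def pvF : List (List Char) → Option (List Char)
  | [] => none
  | [_] => none
  | p :: q :: rest => if p = pvCR then some (pvCRS ++ q) else pvF (q :: rest)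

lemma pvSplitAux_ne_nil (s : List Char) : pvSplitAux s ≠ [] := by
  induction s with
  | nil => simp [pvSplitAux]
  | cons c rest ih =>
    simp only [pvSplitAux]
    split_ifs
    · simp
    · cases h : pvSplitAux rest with
      | nil => exact absurd h ih
      | cons a t => simp [List.modifyHead]

lemma pvSplitOn_go_eq (fuel : Nat) : ∀ (s cur : List Char) (hacc : List (List Char)),
    s.length ≤ fuel →
    PySem.Chars.splitOn.go ['/'] fuel s cur hacc =
      hacc.reverse ++ (pvSplitAux s).modifyHead (cur.reverse ++ ·) := by
  induction fuel with
  | zero =>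
    intro s cur hacc hlen
    have : s = [] := List.eq_nil_of_length_eq_zero (Nat.le_zero.mp hlen)
    subst this
    simp [PySem.Chars.splitOn.go, pvSplitAux, List.modifyHead]
  | succ fuel ih =>
    intro s cur hacc hlen
    cases s with
    | nil => simp [PySem.Chars.splitOn.go, pvSplitAux, List.modifyHead]
    | cons c rest =>
      simp only [PySem.Chars.splitOn.go]
      by_cases hc : c = '/'
      · subst hc
        have hpref : List.isPrefixOf ['/'] ('/' :: rest) = true := by
          simp [List.isPrefixOf]
        rw [if_pos hpref]
        have := ih rest [] (cur.reverse :: hacc) (by simpa using Nat.le_of_succ_le_succ hlen)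
        simp only [List.length_cons, List.length_nil, List.drop_succ_cons, List.drop_zero] at this ⊢
        rw [this]
        cases h : pvSplitAux rest with
        | nil => exact absurd h (pvSplitAux_ne_nil rest)
        | cons a t =>
          simp [pvSplitAux, h, List.modifyHead]
      · have hpref : List.isPrefixOf ['/'] (c :: rest) = false := by
          simp [List.isPrefixOf]
          intro h; exact absurd h.symm hc  -- c ≠ '/'
        rw [if_neg (by simp [hpref])]
        have := ih rest (c :: cur) hacc (by simpa using Nat.le_of_succ_le_succ hlen)
        rw [this]
        cases h : pvSplitAux rest with
        | nil => exact absurd h (pvSplitAux_ne_nil rest)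
        | cons a t =>
          simp [pvSplitAux, h, hc, List.modifyHead, List.reverse_cons, List.append_assoc]

lemma pvSplitOn_eq (s : List Char) :
    PySem.Chars.splitOn s "/".toList = pvSplitAux s := by
  have h : "/".toList = ['/'] := by decide
  rw [h]
  show PySem.Chars.splitOn.go ['/'] (s.length + 1) s [] [] = _
  rw [pvSplitOn_go_eq (s.length + 1) s [] [] (by omega)]
  cases h : pvSplitAux s with
  | nil => exact absurd h (pvSplitAux_ne_nil s)
  | cons a t => simp [List.modifyHead]

lemma pvJoin_splitAux (s : List Char) : pvJoin (pvSplitAux s) = s := by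
  induction s with
  | nil => simp [pvSplitAux, pvJoin]
  | cons c rest ih =>
    simp only [pvSplitAux]
    by_cases hc : c = '/'
    · subst hc
      rw [if_pos rfl]
      cases h : pvSplitAux rest with
      | nil => exact absurd h (pvSplitAux_ne_nil rest)
      | cons a t => rw [h] at ih; simp [pvJoin, ih]
    · rw [if_neg hc]
      cases h : pvSplitAux rest with
      | nil => exact absurd h (pvSplitAux_ne_nil rest)
      | cons a t =>
        rw [h] at ih
        cases t with
        | nil => simp [pvJoin, List.modifyHead] at ih ⊢; simp [ih]
        | cons b u => simp [pvJoin, List.modifyHead] at ih ⊢; simp [ih]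

lemma pvSplitAux_no_slash (s : List Char) : ∀ p ∈ pvSplitAux s, '/' ∉ p := by
  induction s with
  | nil => simp [pvSplitAux]
  | cons c rest ih =>
    simp only [pvSplitAux]
    by_cases hc : c = '/'
    · subst hc; rw [if_pos rfl]
      intro p hp
      rcases List.mem_cons.mp hp with h | h
      · subst h; simp
      · exact ih p h
    · rw [if_neg hc]
      cases h : pvSplitAux rest with
      | nil => exact absurd h (pvSplitAux_ne_nil rest)
      | cons a t =>
        intro p hp
        rcases List.mem_cons.mp hp with h1 | h1
        · subst h1
          intro hm
          rcases List.mem_cons.mp hm with h2 | h2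
          · exact hc h2.symm
          · exact ih a (by rw [h]; exact List.mem_cons_self) h2
        · exact ih p (by rw [h]; exact List.mem_cons_of_mem a h1)

-- [a] <+: m ↔ m[0]? = some a
lemma pvSingleton_prefix (a : Char) (m : List Char) : [a] <+: m ↔ m[0]? = some a := by
  cases m with
  | nil => simp
  | cons b t => simp [List.cons_prefix_cons, eq_comm]

-- find on a slash-free list
lemma pvFind_no_slash (l : List Char) (h : '/' ∉ l) : PySem.Chars.find l ['/'] = -1 := by
  rw [PySem.Chars.find_eq_neg_one_iff]
  intro hinf
  exact h ((List.singleton_infix_iff '/' l).mp hinf)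

-- find on q ++ '/' :: t with q slash-free finds exactly q.length
lemma pvFind_append (q t : List Char) (h : '/' ∉ q) :
    PySem.Chars.find (q ++ '/' :: t) ['/'] = (q.length : Int) := by
  set s := q ++ '/' :: t with hs
  have hmem : '/' ∈ s := by simp [hs]
  have h0 : (0:Int) ≤ PySem.Chars.find s ['/'] :=
    (PySem.Chars.find_nonneg_iff s ['/']).mpr ((List.singleton_infix_iff '/' s).mpr hmem)
  obtain ⟨hpre, hmin⟩ := PySem.Chars.find_spec h0
  set n := (PySem.Chars.find s ['/']).toNat with hn
  have hat : s[n]? = some '/' := by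
    have := (pvSingleton_prefix '/' (s.drop n)).mp hpre
    simpa [List.getElem?_drop] using this
  have hq : s[q.length]? = some '/' := by
    simp [hs]
  have hne : n = q.length := by
    rcases Nat.lt_trichotomy n q.length with hlt | he | hgt
    · exfalso
      have : s[n]? = q[n]? := by
        rw [hs, List.getElem?_append_left hlt]
      rw [this] at hat
      exact h (List.mem_of_getElem? hat)
    · exact he
    · exfalso
      apply hmin q.length hgt
      rw [pvSingleton_prefix]
      simpa [List.getElem?_drop] using hq
  omega

-- prefix with slash-free heads forces equal heads
lemma pvPrefix_seg : ∀ (a b u v : List Char), '/' ∉ a → '/' ∉ b →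
    (a ++ '/' :: u) <+: (b ++ '/' :: v) → a = b := by
  intro a
  induction a with
  | nil =>
    intro b u v _ hb hp
    cases b with
    | nil => rfl
    | cons c bt =>
      exfalso
      simp only [List.nil_append, List.cons_append, List.cons_prefix_cons] at hp
      exact hb (by simp [hp.1.symm])
  | cons c at' ih =>
    intro b u v ha hb hp
    cases b with
    | nil =>
      exfalso
      simp only [List.cons_append, List.nil_append, List.cons_prefix_cons] at hp
      exact ha (by simp [hp.1])
    | cons d bt =>
      simp only [List.cons_append, List.cons_prefix_cons] at hp
      have h1 : c = d := hp.1
      have h2 : at' = bt :=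
        ih bt u v (fun hm => ha (List.mem_cons_of_mem c hm))
          (fun hm => hb (List.mem_cons_of_mem d hm)) hp.2
      rw [h1, h2]

lemma pvCRS_eq : pvCRS = pvCR ++ ['/'] := by decide

lemma pvCR_no_slash : '/' ∉ pvCR := by decide

-- startswith pvCRS on a slash-free string is false
lemma pvStartswith_bare (p : List Char) (hp : '/' ∉ p) :
    PySem.Chars.startswith p pvCRS = false := by
  rw [Bool.eq_false_iff]
  intro h
  have := (PySem.Chars.startswith_iff p pvCRS).mp h
  have hslash : '/' ∈ pvCRS := by decide
  exact hp (this.sublist.mem hslash)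

-- startswith pvCRS on p ++ '/' :: t (p slash-free) iff p = pvCR
lemma pvStartswith_seg (p t : List Char) (hp : '/' ∉ p) :
    PySem.Chars.startswith (p ++ '/' :: t) pvCRS = true ↔ p = pvCR := by
  rw [PySem.Chars.startswith_iff, pvCRS_eq]
  constructor
  · intro h
    exact (pvPrefix_seg pvCR p [] t pvCR_no_slash hp h).symm
  · intro h; subst h
    exact ⟨t, by simp⟩

-- A's loop computes pvF
lemma pvAGo_eq : ∀ (suf pre : List (List Char)),
    pvAGo (pre ++ suf) (PySem.List.enumerate suf (pre.length : Int)) = pvF suf := by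
  intro suf
  induction suf with
  | nil => intro pre; simp [PySem.List.enumerate_nil, pvAGo, pvF]
  | cons p suf' ih =>
    intro pre
    rw [PySem.List.enumerate_cons]
    cases suf' with
    | nil =>
      simp only [pvAGo, pvF]
      rw [if_neg]
      · simp [PySem.List.enumerate_nil, pvAGo]
      · rintro ⟨-, hlt⟩
        simp only [List.length_append, List.length_cons, List.length_nil] at hlt
        omega
    | cons q rs =>
      simp only [pvAGo]
      by_cases hp : p = pvCR
      · rw [if_pos (show p = pvCR ∧ (pre.length : Int) + 1 < ((pre ++ p :: q :: rs).length : Int) by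
            refine ⟨hp, ?_⟩
            simp only [List.length_append, List.length_cons]
            push_cast; omega)]
        have hcast : (pre.length : Int) + 1 = ((pre.length + 1 : Nat) : Int) := by push_cast; ring
        rw [hcast, PySem.List.pyGetD_natCast]
        have hget : (pre ++ p :: q :: rs).getD (pre.length + 1) [] = q := by
          rw [List.getD_eq_getElem?_getD, List.getElem?_append_right (by omega)]
          simp
        rw [hget]
        simp [pvF, hp]
      · rw [if_neg (by rintro ⟨h1, -⟩; exact hp h1)]
        have hlen : (pre.length : Int) + 1 = ((pre ++ [p]).length : Int) := by
          simp
        have happ : pre ++ p :: q :: rs = (pre ++ [p]) ++ q :: rs := by simp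
        rw [hlen, happ, ih (pre ++ [p])]
        simp [pvF, hp]

-- B's scan computes pvF on pvJoin of slash-free nonempty parts
lemma pvBScan_eq : ∀ (parts : List (List Char)), parts ≠ [] →
    (∀ p ∈ parts, '/' ∉ p) → pvBScan (pvJoin parts) = pvF parts := by
  intro parts
  induction parts with
  | nil => intro h; exact absurd rfl h
  | cons p rest ih =>
    intro _ hfree
    have hp : '/' ∉ p := hfree p List.mem_cons_self
    cases rest with
    | nil =>
      rw [pvJoin, pvBScan]
      rw [pvStartswith_bare p hp]
      simp only [Bool.false_eq_true, if_false]
      rw [dif_pos (by rw [pvFind_no_slash p hp]; omega)]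
      rfl
    | cons q rs =>
      have hq : '/' ∉ q := hfree q (List.mem_cons_of_mem p List.mem_cons_self)
      have hjoin : pvJoin (p :: q :: rs) = p ++ '/' :: pvJoin (q :: rs) := rfl
      rw [hjoin, pvBScan]
      by_cases hpc : p = pvCR
      · rw [if_pos ((pvStartswith_seg p (pvJoin (q :: rs)) hp).mpr hpc)]
        have hlen18 : (pvCRS.length : Int) = 18 := by decide
        have hs18 : p ++ '/' :: pvJoin (q :: rs) = pvCRS ++ pvJoin (q :: rs) := by
          rw [hpc, pvCRS_eq]; simp
        have htail : PySem.List.slice (p ++ '/' :: pvJoin (q :: rs)) (some 18) none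
            = pvJoin (q :: rs) := by
          rw [hs18, PySem.List.slice_from _ (by omega)]
          exact List.drop_left' (by decide)
        rw [htail]
        cases rs with
        | nil =>
          have hjq : pvJoin [q] = q := rfl
          rw [hjq, pvFind_no_slash q hq, if_pos (by omega)]
          simp [pvF, hpc]
        | cons r rs' =>
          have hjq : pvJoin (q :: r :: rs') = q ++ '/' :: pvJoin (r :: rs') := rfl
          rw [hjq, pvFind_append q _ hq, if_neg (by omega)]
          rw [PySem.List.slice_to _ (by omega)]
          simp only [Int.toNat_natCast]
          rw [List.take_left' rfl]
          simp [pvF, hpc]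
      · rw [if_neg (by
            intro h
            exact hpc ((pvStartswith_seg p (pvJoin (q :: rs)) hp).mp h))]
        rw [dif_neg (by rw [pvFind_append p _ hp]; omega)]
        have hdrop : PySem.List.slice (p ++ '/' :: pvJoin (q :: rs))
            (some (PySem.Chars.find (p ++ '/' :: pvJoin (q :: rs)) ['/'] + 1)) none
            = pvJoin (q :: rs) := by
          rw [pvFind_append p _ hp, PySem.List.slice_from _ (by omega)]
          have : ((p.length : Int) + 1).toNat = p.length + 1 := by omega
          rw [this]
          rw [show p.length + 1 = (p ++ ['/']).length by simp]
          rw [show p ++ '/' :: pvJoin (q :: rs) = (p ++ ['/']) ++ pvJoin (q :: rs) by simp]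
          exact List.drop_left' rfl
        rw [hdrop, ih (by simp) (fun x hx => hfree x (List.mem_cons_of_mem p hx))]
        simp [pvF, hpc]

-- ===== VERDICT (by name: the statement is the Claim_ definition above) =====
theorem get_conference_record_from_child_spec : Claim_equal_get_conference_record_from_child := by
  unfold Claim_equal_get_conference_record_from_child
  intro s _
  unfold Spec_get_conference_record_from_child
  unfold get_conference_record_from_child get_conference_record_from_child_alt
  by_cases hnil : s.toList = []
  · simp [hnil]
  · rw [if_neg hnil, if_neg hnil]
    simp only []
    rw [pvSplitOn_eq]
    have hne := pvSplitAux_ne_nil s.toList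
    have hA : pvAGo (pvSplitAux s.toList)
        (PySem.List.enumerate (pvSplitAux s.toList) 0) = pvF (pvSplitAux s.toList) := by
      have := pvAGo_eq (pvSplitAux s.toList) []
      simpa using this
    have hB : pvBScan s.toList = pvF (pvSplitAux s.toList) := by
      conv_lhs => rw [← pvJoin_splitAux s.toList]
      exact pvBScan_eq _ hne (pvSplitAux_no_slash s.toList)
    rw [hA, hB]
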